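-- pv_equiv track=rewrite | github.com/Transpyler/pytuga | build/lib/tugalinhas/main_window.py | _remove_toplevel
-- ===== SOURCE A (Python) =====
-- def _remove_toplevel(data):
--     '''When a page has both function definitions and top-level
--         code, we only want to exec the function defs and not
--         the top-level code when loading the file.
--
--         This function takes the page of code and will return
--         only the function and class defs with all other
--         top-level code stripped out.
--     '''
--
--     newdata = []
--
--     indef = False
--     for line in data.splitlines():
--         indented = line.startswith(' ')
--         blank = line.isspace()
--         if not line or blank:
--             pass
--         elif not indented:
--             if line.startswith('def ') or line.startswith('class '):
--                 indef = True
--             else: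
--                 indef = False
--
--         if indef:
--             newdata.append(line)
--
--     return '\n'.join(newdata)
-- ===== SOURCE B (Python) =====
-- def _remove_toplevel(data):
--     '''Block-based rewrite: split into top-level blocks, keep def/class blocks.'''
--     blocks = []
--     current = None
--     for line in data.splitlines():
--         if line and not line.isspace() and not line.startswith(' '):
--             current = [line]
--             blocks.append(current)
--         elif current is not None:
--             current.append(line)
--     kept = [ln for b in blocks
--             if b[0].startswith('def ') or b[0].startswith('class ')
--             for ln in b]
--     return '\n'.join(kept)
-- ===== Notes on version B (the rewrite author's own statement) =====
-- stated objective: alternative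
-- what changed: A is a line-by-line state machine carrying a boolean in-definition flag and appending kept lines as it goes; B first splits the input into top-level blocks (a new block at each non-empty, non-whitespace, non-indented header line), then filters the blocks by whether their header line begins a function or class definition and joins the kept blocks' lines.
import Mathlib
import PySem

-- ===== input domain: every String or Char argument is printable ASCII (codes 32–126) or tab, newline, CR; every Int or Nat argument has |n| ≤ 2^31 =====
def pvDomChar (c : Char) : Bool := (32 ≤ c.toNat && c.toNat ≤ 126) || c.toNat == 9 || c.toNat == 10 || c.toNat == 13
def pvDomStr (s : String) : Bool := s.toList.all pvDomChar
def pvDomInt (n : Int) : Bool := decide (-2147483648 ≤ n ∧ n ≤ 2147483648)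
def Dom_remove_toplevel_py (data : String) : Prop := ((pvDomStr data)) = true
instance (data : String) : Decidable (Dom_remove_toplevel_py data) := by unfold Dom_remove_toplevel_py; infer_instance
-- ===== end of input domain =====

-- B rewrites A's line-by-line state machine as a block decomposition (split into top-level
-- blocks, filter by def/class header, join); objective: alternative decomposition, same cost.

-- ===== PORT A =====
-- loop body of A's `for line in data.splitlines()` over state (newdata, indef)
def pvStepA (st : List String × Bool) (line : String) : List String × Bool :=
  let indented := PySem.Str.startswith line " "
  let blank := PySem.Str.strIsspace line
  let indef :=
    if line == "" || blank then st.2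
    else if !indented then
      PySem.Str.startswith line "def " || PySem.Str.startswith line "class "
    else st.2
  (if indef then st.1 ++ [line] else st.1, indef)

def remove_toplevel_py (data : String) : String :=
  PySem.Str.join "\n" ((PySem.Str.splitlines data).foldl pvStepA ([], false)).1

-- ===== PORT B =====
-- loop body of B: blocks as (header, reversed body) pairs, most recent block first
def pvStepB (bs : List (String × List String)) (line : String) : List (String × List String) :=
  if line != "" && !PySem.Str.strIsspace line && !PySem.Str.startswith line " " then
    (line, []) :: bs
  else
    match bs with
    | [] => []
    | (h, b) :: t => (h, line :: b) :: t

def remove_toplevel_py_alt (data : String) : String :=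
  let bs := (PySem.Str.splitlines data).foldl pvStepB []
  PySem.Str.join "\n"
    ((bs.reverse.filter
        (fun x => PySem.Str.startswith x.1 "def " || PySem.Str.startswith x.1 "class ")).flatMap
      (fun x => x.1 :: x.2.reverse))

-- ===== PRECONDITION & SPEC =====
def Spec_remove_toplevel_py (data : String) (out : String) : Prop := out = remove_toplevel_py_alt data
instance (data : String) (out : String) : Decidable (Spec_remove_toplevel_py data out) := by unfold Spec_remove_toplevel_py; infer_instance

-- ===== CLAIM (what is proved, stated in full; the proofs are below) =====
def Claim_equal_remove_toplevel_py : Prop := ∀ (data : String), Dom_remove_toplevel_py data → Spec_remove_toplevel_py data (remove_toplevel_py data)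

-- ===== LEMMAS AND PROOFS =====

-- the def/class header test
def pvP (h : String) : Bool := PySem.Str.startswith h "def " || PySem.Str.startswith h "class "

-- lines of B's state that survive the final filter, in output order
def pvKept (bs : List (String × List String)) : List String :=
  (bs.reverse.filter (fun x => pvP x.1)).flatMap (fun x => x.1 :: x.2.reverse)

-- A's indef, read off B's state: is the current block's header a def/class header?
def pvCur (bs : List (String × List String)) : Bool :=
  match bs with
  | [] => false
  | (h, _) :: _ => pvP h

theorem pvKept_cons (h : String) (b : List String) (t : List (String × List String)) :
    pvKept ((h, b) :: t) = pvKept t ++ (if pvP h then h :: b.reverse else []) := by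
  simp only [pvKept, List.reverse_cons, List.filter_append, List.flatMap_append]
  cases hp : pvP h <;> simp [hp]

-- A's indef update, written through the single header test of B
theorem pvIndefA (line : String) (i : Bool) :
    (if line == "" || PySem.Str.strIsspace line then i
     else if !PySem.Str.startswith line " " then pvP line else i)
    = if line != "" && !PySem.Str.strIsspace line && !PySem.Str.startswith line " " then
        pvP line
      else i := by
  cases h1 : line == "" <;> cases h2 : PySem.Str.strIsspace line <;>
    cases h3 : PySem.Str.startswith line " " <;>
      simp [h1, bne]

theorem pvStep_eq (bs : List (String × List String)) (line : String) :
    pvStepA (pvKept bs, pvCur bs) line = (pvKept (pvStepB bs line), pvCur (pvStepB bs line)) := by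
  have hP : ∀ s : String,
      (PySem.Str.startswith s "def " || PySem.Str.startswith s "class ") = pvP s := fun _ => rfl
  simp only [pvStepA, pvStepB, hP]
  rw [pvIndefA]
  cases hc : line != "" && !PySem.Str.strIsspace line && !PySem.Str.startswith line " "
  · -- non-header line: appended to the current block, or dropped when none is open
    simp only [Bool.false_eq_true, if_false]
    rcases bs with _ | ⟨⟨h, b⟩, t⟩
    · simp [pvCur]
    · simp only [pvCur]
      rcases Bool.eq_false_or_eq_true (pvP h) with hp | hp <;>
        simp [hp, pvKept_cons, List.append_assoc]
  · -- header line: a new block starts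
    simp only [if_true, pvKept_cons, pvCur, List.reverse_nil]
    rcases Bool.eq_false_or_eq_true (pvP line) with hp | hp <;> simp [hp]

theorem pvLoop (lines : List String) :
    ∀ bs : List (String × List String),
      lines.foldl pvStepA (pvKept bs, pvCur bs) =
        (pvKept (lines.foldl pvStepB bs), pvCur (lines.foldl pvStepB bs)) := by
  induction lines with
  | nil => intro bs; simp
  | cons l ls ih =>
      intro bs
      simp only [List.foldl_cons, pvStep_eq bs l]
      exact ih _

-- ===== VERDICT (by name: the statement is the Claim_ definition above) =====
theorem remove_toplevel_py_spec : Claim_equal_remove_toplevel_py := by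
  intro data _
  show remove_toplevel_py data = remove_toplevel_py_alt data
  have h := pvLoop (PySem.Str.splitlines data) []
  have h0 : pvKept [] = [] := rfl
  have h1 : pvCur [] = false := rfl
  rw [h0, h1] at h
  unfold remove_toplevel_py remove_toplevel_py_alt
  rw [h]
  simp [pvKept, pvP]
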